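-- pv_equiv track=rewrite | github.com/marioga/adventofcode2021 | d3p2.py | filter_down
-- ===== SOURCE A (Python) =====
-- def filter_down(vals, mask, smaller_than=True):
--     zero, one = [], []
--     for num in vals:
--         if mask & num:
--             one.append(num)
--         else:
--             zero.append(num)
--
--     return zero if (len(one) >= len(zero)) == smaller_than else one
-- ===== SOURCE B (Python) =====
-- def filter_down(vals, mask, smaller_than=True):
--     ones = sum(1 for num in vals if mask & num)
--     zeros = len(vals) - ones
--     if (ones >= zeros) == smaller_than:
--         return [num for num in vals if not (mask & num)]
--     return [num for num in vals if mask & num]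
-- ===== Notes on version B (the rewrite author's own statement) =====
-- stated objective: simpler
-- what changed: Replaces the dual-accumulator partition pass by a counting pass plus one conditional filter that builds only the returned group.
import Mathlib
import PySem

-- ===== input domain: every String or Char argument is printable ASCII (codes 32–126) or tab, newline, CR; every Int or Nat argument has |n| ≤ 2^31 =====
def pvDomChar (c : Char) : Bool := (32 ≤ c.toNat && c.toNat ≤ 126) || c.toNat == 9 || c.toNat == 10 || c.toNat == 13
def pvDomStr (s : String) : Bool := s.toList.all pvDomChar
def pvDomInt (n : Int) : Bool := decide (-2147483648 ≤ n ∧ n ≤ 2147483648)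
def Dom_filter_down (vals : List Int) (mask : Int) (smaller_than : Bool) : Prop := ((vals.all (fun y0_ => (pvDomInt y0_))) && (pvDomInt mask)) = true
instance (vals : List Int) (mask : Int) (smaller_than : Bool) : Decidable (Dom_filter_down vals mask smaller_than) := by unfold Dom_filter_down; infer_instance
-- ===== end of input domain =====

-- B replaces A's dual-accumulator partition pass by a counting pass plus one
-- conditional filter that builds only the returned group (objective: simpler).

-- ===== PORT A =====
-- A: one loop appending each num to `one` or `zero`, then pick a list by the length test.
def filter_down (vals : List Int) (mask : Int) (smaller_than : Bool) : List Int :=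
  let p := vals.foldl
    (fun (acc : List Int × List Int) num =>
      if PySem.Int.band mask num ≠ 0 then (acc.1, acc.2 ++ [num])
      else (acc.1 ++ [num], acc.2))
    ([], [])
  if (decide (p.1.length ≤ p.2.length)) == smaller_than then p.1 else p.2

-- ===== PORT B =====
-- B: count the set-mask elements, then one conditional filter.
def filter_down_alt (vals : List Int) (mask : Int) (smaller_than : Bool) : List Int :=
  let ones : Int := vals.foldl
    (fun acc num => if PySem.Int.band mask num ≠ 0 then acc + 1 else acc) 0
  let zeros : Int := (vals.length : Int) - ones
  if (decide (zeros ≤ ones)) == smaller_than then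
    vals.filter (fun num => !(PySem.Int.band mask num ≠ 0))
  else
    vals.filter (fun num => PySem.Int.band mask num ≠ 0)

-- ===== PRECONDITION & SPEC =====
def Spec_filter_down (vals : List Int) (mask : Int) (smaller_than : Bool) (out : List Int) : Prop := out = filter_down_alt vals mask smaller_than
instance (vals : List Int) (mask : Int) (smaller_than : Bool) (out : List Int) : Decidable (Spec_filter_down vals mask smaller_than out) := by unfold Spec_filter_down; infer_instance

-- ===== CLAIM (what is proved, stated in full; the proofs are below) =====
def Claim_equal_filter_down : Prop := ∀ (vals : List Int) (mask : Int) (smaller_than : Bool), Dom_filter_down vals mask smaller_than → Spec_filter_down vals mask smaller_than (filter_down vals mask smaller_than)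

-- ===== LEMMAS AND PROOFS =====

theorem filter_down_if_congr {α : Type} (c1 c2 : Bool) (a b : α)
    (h : c1 = c2) : (if c1 = true then a else b) = (if c2 = true then a else b) := by
  rw [h]

-- A's fold computes the two filters, appended to the accumulators.
theorem filter_down_foldA (mask : Int) (vals z o : List Int) :
    vals.foldl
      (fun (acc : List Int × List Int) num =>
        if PySem.Int.band mask num ≠ 0 then (acc.1, acc.2 ++ [num])
        else (acc.1 ++ [num], acc.2))
      (z, o)
    = (z ++ vals.filter (fun num => !(decide (PySem.Int.band mask num ≠ 0))),
       o ++ vals.filter (fun num => decide (PySem.Int.band mask num ≠ 0))) := by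
  induction vals generalizing z o with
  | nil => simp
  | cons x xs ih =>
    simp only [List.foldl_cons]
    by_cases h : PySem.Int.band mask x ≠ 0
    · rw [if_pos h, ih]; simp [List.filter_cons, h]
    · rw [if_neg h, ih]; simp [List.filter_cons, h]

-- B's counting fold computes the length of the set-mask filter.
theorem filter_down_foldB (mask : Int) (vals : List Int) (c : Int) :
    vals.foldl (fun acc num => if PySem.Int.band mask num ≠ 0 then acc + 1 else acc) c
    = c + ((vals.filter (fun num => decide (PySem.Int.band mask num ≠ 0))).length : Int) := by
  induction vals generalizing c with
  | nil => simp
  | cons x xs ih =>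
    simp only [List.foldl_cons]
    by_cases h : PySem.Int.band mask x ≠ 0
    · rw [if_pos h, ih]; simp [List.filter_cons, h]; ring
    · rw [if_neg h, ih]; simp [List.filter_cons, h]

-- ===== VERDICT (by name: the statement is the Claim_ definition above) =====
theorem filter_down_spec : Claim_equal_filter_down := by
  intro vals mask smaller_than _
  unfold Spec_filter_down filter_down filter_down_alt
  rw [filter_down_foldA, filter_down_foldB]
  have hlen : vals.length
      = (vals.filter (fun num => decide (PySem.Int.band mask num ≠ 0))).length
        + (vals.filter (fun num => !(decide (PySem.Int.band mask num ≠ 0)))).length :=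
    List.length_eq_length_filter_add (fun num => decide (PySem.Int.band mask num ≠ 0))
  simp only [List.nil_append]
  refine filter_down_if_congr _ _ _ _ ?_
  congr 1
  rw [decide_eq_decide]
  constructor <;> intro <;> omega
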